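-- pv_equiv track=rewrite | github.com/darkpaw/oxide_atlas | misc/tile_counts.py | tiles_per_zoom_level
-- ===== SOURCE A (Python) =====
-- def tiles_per_zoom_level(max_zoom=18):
--     running_total = 0
--     zoom_levels = {}
--
--     for _zoom in range(max_zoom + 1):
--         tiles = 2 ** (_zoom * 2)
--         running_total += tiles
--         zoom_levels[_zoom] = {"tiles": tiles, "running_total": running_total}
--
--     return zoom_levels
-- ===== SOURCE B (Python) =====
-- def tiles_per_zoom_level(max_zoom=18):
--     # closed forms: tiles at zoom z = 4**z, cumulative total = (4**(z+1)-1)//3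
--     return {
--         zoom: {"tiles": 4 ** zoom, "running_total": (4 ** (zoom + 1) - 1) // 3}
--         for zoom in range(max_zoom + 1)
--     }
-- ===== Notes on version B (the rewrite author's own statement) =====
-- stated objective: alternative
-- what changed: replaces the loop-carried running_total accumulator with an independent closed-form geometric-series formula per zoom ((4**(zoom+1)-1)//3), built as a dict comprehension with no loop state
import Mathlib
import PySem

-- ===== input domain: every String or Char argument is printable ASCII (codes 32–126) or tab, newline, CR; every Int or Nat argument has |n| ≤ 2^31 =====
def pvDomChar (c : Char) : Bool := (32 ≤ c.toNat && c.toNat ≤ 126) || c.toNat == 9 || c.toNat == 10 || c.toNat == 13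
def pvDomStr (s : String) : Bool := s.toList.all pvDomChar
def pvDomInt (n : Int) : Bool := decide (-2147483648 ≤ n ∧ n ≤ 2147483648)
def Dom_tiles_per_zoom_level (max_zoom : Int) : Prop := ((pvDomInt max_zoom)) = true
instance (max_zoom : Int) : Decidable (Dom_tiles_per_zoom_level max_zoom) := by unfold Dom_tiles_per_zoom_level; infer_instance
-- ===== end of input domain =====

-- B replaces the loop-carried running_total with a per-zoom closed-form geometric sum (alternative decomposition, same cost).
-- ===== PORT A =====
def tiles_per_zoom_level (max_zoom : Int) : List (Int × List (String × Int)) :=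
  ((PySem.List.pyRange 0 (max_zoom + 1) 1).foldl
    (fun (st : Int × PySem.Dict Int (List (String × Int))) z =>
      let tiles : Int := 2 ^ (z * 2).toNat
      let rt := st.1 + tiles
      (rt, st.2.insert z [("tiles", tiles), ("running_total", rt)]))
    ((0 : Int), PySem.Dict.empty)).2.items

-- ===== PORT B =====
def tiles_per_zoom_level_alt (max_zoom : Int) : List (Int × List (String × Int)) :=
  (PySem.List.pyRange 0 (max_zoom + 1) 1).map
    (fun z => (z, [("tiles", (4 : Int) ^ z.toNat),
                   ("running_total", PySem.Int.floordiv ((4 : Int) ^ (z + 1).toNat - 1) 3)]))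

-- ===== PRECONDITION & SPEC =====
def Spec_tiles_per_zoom_level (max_zoom : Int) (out : List (Int × List (String × Int))) : Prop := out = tiles_per_zoom_level_alt max_zoom
instance (max_zoom : Int) (out : List (Int × List (String × Int))) : Decidable (Spec_tiles_per_zoom_level max_zoom out) := by unfold Spec_tiles_per_zoom_level; infer_instance

-- ===== CLAIM (what is proved, stated in full; the proofs are below) =====
def Claim_equal_tiles_per_zoom_level : Prop := ∀ (max_zoom : Int), Dom_tiles_per_zoom_level max_zoom → Spec_tiles_per_zoom_level max_zoom (tiles_per_zoom_level max_zoom)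

-- ===== LEMMAS AND PROOFS =====

def pvEntry (z : Int) : Int × List (String × Int) :=
  (z, [("tiles", (4 : Int) ^ z.toNat),
       ("running_total", PySem.Int.floordiv ((4 : Int) ^ (z + 1).toNat - 1) 3)])

theorem pv_three_dvd (n : Nat) : (3 : Int) ∣ (4 : Int) ^ n - 1 := by
  induction n with
  | zero => simp
  | succ k ih =>
    obtain ⟨c, hc⟩ := ih
    exact ⟨4 * c + 1, by rw [pow_succ]; linarith⟩

theorem pv_loop (n : Nat) :
    (PySem.List.pyRange 0 (n : Int) 1).foldl
      (fun (st : Int × PySem.Dict Int (List (String × Int))) z =>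
        let tiles : Int := 2 ^ (z * 2).toNat
        let rt := st.1 + tiles
        (rt, st.2.insert z [("tiles", tiles), ("running_total", rt)]))
      ((0 : Int), PySem.Dict.empty)
    = (((4 : Int) ^ n - 1) / 3,
       PySem.Dict.mk ((PySem.List.pyRange 0 (n : Int) 1).map pvEntry)) := by
  induction n with
  | zero => simp [PySem.List.pyRange_one_eq_nil]; rfl
  | succ k ih =>
    have hsplit : PySem.List.pyRange 0 ((k : Int) + 1) 1
        = PySem.List.pyRange 0 (k : Int) 1 ++ [(k : Int)] :=
      PySem.List.pyRange_one_succ_right (by positivity)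
    rw [Nat.cast_add, Nat.cast_one, hsplit, List.foldl_append, ih]
    have htiles : (2 : Int) ^ (((k : Int) * 2).toNat) = 4 ^ k := by
      have h2 : ((k : Int) * 2).toNat = 2 * k := by omega
      rw [h2, pow_mul]; norm_num
    have hrt : ((4 : Int) ^ k - 1) / 3 + 4 ^ k = ((4 : Int) ^ (k + 1) - 1) / 3 := by
      obtain ⟨c, hc⟩ := pv_three_dvd k
      have h4 : (4 : Int) ^ (k + 1) = 4 * 4 ^ k := by rw [pow_succ]; ring
      omega
    have hnc : (PySem.Dict.mk ((PySem.List.pyRange 0 (k : Int) 1).map pvEntry)).contains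
        (k : Int) = false := by
      simp [pvEntry, PySem.List.mem_pyRange_one]
      intro x _ h2
      omega
    simp only [List.foldl_cons, List.foldl_nil]
    refine Prod.ext ?_ ?_
    · simpa [htiles] using hrt
    · show _ = PySem.Dict.mk _
      rw [PySem.Dict.ext_iff]
      rw [PySem.Dict.items_insert_of_not_contains _ _ hnc]
      simp [pvEntry, htiles, hrt]

-- ===== VERDICT (by name: the statement is the Claim_ definition above) =====
theorem tiles_per_zoom_level_spec : Claim_equal_tiles_per_zoom_level := by
  intro m _
  unfold Spec_tiles_per_zoom_level tiles_per_zoom_level tiles_per_zoom_level_alt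
  by_cases h : m + 1 ≤ 0
  · rw [PySem.List.pyRange_one_eq_nil h]; rfl
  · have h0 : 0 ≤ m := by omega
    have hm : m + 1 = ((m.toNat + 1 : Nat) : Int) := by omega
    rw [hm, pv_loop, ← hm]
    rfl
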